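-- pv_equiv track=rewrite | github.com/matsen/pplacer | scripts/extract_taxonomy_from_biom.py | lineages
-- ===== SOURCE A (Python) =====
-- root_id = 'Root'
--
-- def lineages(taxonomy, root_name=root_id):
--     """
--     Yields (<;-delimited lineage>, <node>, <;-delimited parent lineage>)
--     tuple for every entry in ``taxonomy``
--     """
--     parent = root_name
--     cur_lineage = [root_name]
--     for node in taxonomy:
--         cur_lineage.append(node)
--         tax_id = ';'.join(cur_lineage)
--         yield tax_id, node, parent
--         parent = tax_id
-- ===== SOURCE B (Python) =====
-- root_id = 'Root'
--
-- def lineages(taxonomy, root_name=root_id):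
--     """
--     Yields (<;-delimited lineage>, <node>, <;-delimited parent lineage>)
--     tuple for every entry in ``taxonomy``
--     """
--     nodes = list(taxonomy)
--     prefixes = [root_name]
--     for n in nodes:
--         prefixes.append(prefixes[-1] + ';' + n)
--     for i, node in enumerate(nodes):
--         yield prefixes[i + 1], node, prefixes[i]
-- ===== Notes on version B (the rewrite author's own statement) =====
-- stated objective: alternative
-- what changed: Replaces the single streaming loop that re-joins the growing cur_lineage list on every step with two passes: one pass builds the full table of cumulative prefix strings by extending the previous prefix, then an indexing pass emits (prefixes[i+1], node, prefixes[i]).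
import Mathlib
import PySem

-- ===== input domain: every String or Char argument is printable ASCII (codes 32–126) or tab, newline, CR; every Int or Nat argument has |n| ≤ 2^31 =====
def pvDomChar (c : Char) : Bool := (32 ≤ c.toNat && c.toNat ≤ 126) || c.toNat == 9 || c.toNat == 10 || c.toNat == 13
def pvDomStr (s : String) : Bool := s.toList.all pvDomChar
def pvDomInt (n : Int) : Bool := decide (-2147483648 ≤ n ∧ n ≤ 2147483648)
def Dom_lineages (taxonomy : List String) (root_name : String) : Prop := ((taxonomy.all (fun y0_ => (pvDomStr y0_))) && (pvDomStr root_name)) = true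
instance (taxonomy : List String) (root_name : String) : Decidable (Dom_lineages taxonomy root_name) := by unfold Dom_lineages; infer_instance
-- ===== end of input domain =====

-- B replaces A's streaming loop (which re-joins the whole growing lineage list each step)
-- by a prefix-table pass followed by an indexing emit pass; return value equivalence only
-- (Python A is a generator, B materializes; identical once listed).

-- ===== PORT A =====
-- the for-loop of A, carrying the mutable state (parent, cur_lineage)
def lineagesGo (rest : List String) (parent : String) (cur : List String) :
    List (String × String × String) :=
  match rest with
  | [] => []
  | node :: rest' =>
    let cur' := cur ++ [node]                 -- cur_lineage.append(node)
    let tax := PySem.Str.join ";" cur'        -- ';'.join(cur_lineage)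
    (tax, node, parent) :: lineagesGo rest' tax cur'

def lineages (taxonomy : List String) (root_name : String) : List (String × String × String) :=
  lineagesGo taxonomy root_name [root_name]

-- ===== PORT B =====
-- first pass of B: prefixes = [root_name]; for n in nodes: prefixes.append(prefixes[-1] + ';' + n)
def lineagesPrefixes (nodes : List String) (last : String) : List String :=
  match nodes with
  | [] => [last]
  | n :: rest => last :: lineagesPrefixes rest (last ++ ";" ++ n)

-- second pass of B: for i, node in enumerate(nodes): yield prefixes[i+1], node, prefixes[i]
-- (both indices are always in range, so list.getD is exact here)
def lineagesEmit (nodes : List String) (prefixes : List String) (i : Nat) :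
    List (String × String × String) :=
  match nodes with
  | [] => []
  | node :: rest =>
    (prefixes.getD (i + 1) "", node, prefixes.getD i "") :: lineagesEmit rest prefixes (i + 1)

def lineages_alt (taxonomy : List String) (root_name : String) : List (String × String × String) :=
  let nodes := taxonomy
  let prefixes := lineagesPrefixes nodes root_name
  lineagesEmit nodes prefixes 0

-- ===== PRECONDITION & SPEC =====
def Spec_lineages (taxonomy : List String) (root_name : String) (out : List (String × String × String)) : Prop := out = lineages_alt taxonomy root_name
instance (taxonomy : List String) (root_name : String) (out : List (String × String × String)) : Decidable (Spec_lineages taxonomy root_name out) := by unfold Spec_lineages; infer_instance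

-- ===== CLAIM (what is proved, stated in full; the proofs are below) =====
def Claim_equal_lineages : Prop := ∀ (taxonomy : List String) (root_name : String), Dom_lineages taxonomy root_name → Spec_lineages taxonomy root_name (lineages taxonomy root_name)

-- ===== LEMMAS AND PROOFS =====

-- common reference shape: emits (p;node, node, p) then recurses with the extended prefix
def specLin : List String → String → List (String × String × String)
  | [], _ => []
  | node :: rest, p => (p ++ ";" ++ node, node, p) :: specLin rest (p ++ ";" ++ node)

theorem chars_join_snoc (sep : List Char) (l : List (List Char)) (x : List Char) (h : l ≠ []) :
    PySem.Chars.join sep (l ++ [x]) = PySem.Chars.join sep l ++ sep ++ x := by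
  induction l with
  | nil => exact absurd rfl h
  | cons a t ih =>
    cases t with
    | nil => simp [PySem.Chars.join_cons_cons, PySem.Chars.join_singleton]
    | cons b t' =>
      have h2 := ih (by simp)
      simp only [List.cons_append] at h2 ⊢
      rw [PySem.Chars.join_cons_cons, h2, PySem.Chars.join_cons_cons]
      simp [List.append_assoc]

theorem str_join_snoc (l : List String) (x : String) (h : l ≠ []) :
    PySem.Str.join ";" (l ++ [x]) = PySem.Str.join ";" l ++ ";" ++ x := by
  apply String.ext
  have hm : l.map String.toList ≠ [] := by simpa using h
  simp [PySem.Str.toList_join, chars_join_snoc _ _ _ hm]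

theorem str_join_single (x : String) : PySem.Str.join ";" [x] = x := by
  apply String.ext
  simp [PySem.Str.toList_join, PySem.Chars.join_singleton]

theorem lineagesGo_eq_spec (nodes : List String) (cur : List String) (hc : cur ≠ []) :
    lineagesGo nodes (PySem.Str.join ";" cur) cur = specLin nodes (PySem.Str.join ";" cur) := by
  induction nodes generalizing cur with
  | nil => rfl
  | cons node rest ih =>
    simp only [lineagesGo, specLin, str_join_snoc cur node hc, List.cons.injEq]
    refine ⟨trivial, ?_⟩
    have := ih (cur ++ [node]) (by simp)
    rwa [str_join_snoc cur node hc] at this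

theorem lineagesEmit_eq_spec (nodes : List String) (pre : List String) (p : String) :
    lineagesEmit nodes (pre ++ lineagesPrefixes nodes p) pre.length = specLin nodes p := by
  induction nodes generalizing pre p with
  | nil => rfl
  | cons node rest ih =>
    simp only [lineagesPrefixes, lineagesEmit, specLin]
    have h0 : (pre ++ p :: lineagesPrefixes rest (p ++ ";" ++ node)).getD pre.length "" = p := by
      rw [List.getD_eq_getElem?_getD, List.getElem?_append_right (Nat.le_refl _)]
      simp
    have hhead : (lineagesPrefixes rest (p ++ ";" ++ node)).getD 0 "" = p ++ ";" ++ node := by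
      cases rest <;> simp [lineagesPrefixes]
    have h1 : (pre ++ p :: lineagesPrefixes rest (p ++ ";" ++ node)).getD (pre.length + 1) "" =
        p ++ ";" ++ node := by
      rw [List.getD_eq_getElem?_getD, List.getElem?_append_right (by omega)]
      simpa [List.getD_eq_getElem?_getD, Nat.add_sub_cancel_left] using hhead
    simp only [List.cons.injEq, Prod.mk.injEq]
    refine ⟨⟨by rw [h1], trivial, by rw [h0]⟩, ?_⟩
    have := ih (pre ++ [p]) (p ++ ";" ++ node)
    simpa [List.append_assoc] using this

-- ===== VERDICT (by name: the statement is the Claim_ definition above) =====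
theorem lineages_spec : Claim_equal_lineages := by
  intro taxonomy root_name _
  show lineages taxonomy root_name = lineages_alt taxonomy root_name
  have hA : lineages taxonomy root_name = specLin taxonomy root_name := by
    have := lineagesGo_eq_spec taxonomy [root_name] (by simp)
    simpa [lineages, str_join_single] using this
  have hB : lineages_alt taxonomy root_name = specLin taxonomy root_name := by
    have := lineagesEmit_eq_spec taxonomy [] root_name
    simpa [lineages_alt] using this
  rw [hA, hB]
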